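-- pv_equiv track=rewrite | github.com/antonina48/PPP_25-26_1sem | 1lab/main.py | seatreservation
-- ===== SOURCE A (Python) =====
-- def seatreservation(hall, need_seat):    #ф-ция на бронь подряд идущих мест
--     total_rows=len(hall)
--     for number_row in range(total_rows):
--         all_rows=hall[number_row]   #все настоящие
--         count_free_place=0
--         start=0   #начальная точка
--
--         for number_seat in range(len(all_rows)):
--             if all_rows[number_seat]==0:   #если место свободно
--                 if count_free_place==0:    #сли первое во множ
--                     start=number_seat
--                 count_free_place+=1
--
--             else:   #занятоо
--                 count_free_place=0  #обнуление счёт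
--             if count_free_place==need_seat:  #подряд идущ
--                 for a in range(start, start+need_seat):  #бронь подряж идущ
--                     hall[number_row][a]=1
--                 return (number_row+1, start+1)  #счёт с единцы
--     return None  #если ничо нет
-- ===== SOURCE B (Python) =====
-- def seatreservation(hall, need_seat):
--     # Window-scan re-implementation: try each start position of a need_seat-wide
--     # window of free seats, row by row; book (mutate in place) and return the first hit.
--     # Requests for fewer than one seat are rejected up front.
--     if need_seat < 1:
--         return None
--     for r, row in enumerate(hall):
--         for start in range(len(row) - need_seat + 1):
--             if all(v == 0 for v in row[start:start + need_seat]):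
--                 row[start:start + need_seat] = [1] * need_seat
--                 return (r + 1, start + 1)
--     return None
-- ===== Notes on version B (the rewrite author's own statement) =====
-- stated objective: alternative
-- what changed: Replaces the running consecutive-free counter with an explicit window scan over candidate start positions (slice check per window, plus an up-front need_seat < 1 validation), keeping the same leftmost-window, in-place-booking semantics.
-- intended difference: On need_seat == 0 with some occupied seat in the hall, A returns a (row, seat) pair pointing at the start of the run before the first occupied seat — an artefact of testing the counter right after its reset — while B returns None, the intended answer for a request of zero seats. — e.g. on seatreservation([[1]], 0): A returns some (1, 1), B returns none
import Mathlib
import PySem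

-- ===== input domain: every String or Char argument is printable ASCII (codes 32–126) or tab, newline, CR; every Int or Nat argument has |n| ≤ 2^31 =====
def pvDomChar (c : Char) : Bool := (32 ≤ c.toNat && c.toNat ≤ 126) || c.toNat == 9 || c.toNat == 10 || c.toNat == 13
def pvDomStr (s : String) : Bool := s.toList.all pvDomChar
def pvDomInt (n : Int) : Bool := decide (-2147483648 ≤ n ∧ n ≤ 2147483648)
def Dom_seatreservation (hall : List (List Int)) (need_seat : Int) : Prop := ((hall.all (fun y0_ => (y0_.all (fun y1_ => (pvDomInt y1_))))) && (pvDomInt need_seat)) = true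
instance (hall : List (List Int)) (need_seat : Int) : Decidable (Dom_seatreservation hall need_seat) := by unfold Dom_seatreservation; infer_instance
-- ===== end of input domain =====

-- B replaces A's running consecutive-free counter by an explicit window scan over
-- candidate start positions (with an up-front need_seat < 1 validation); same
-- leftmost-window choice. Both Pythons book the found seats by mutating hall in
-- place identically; the ports and the equivalence are about the RETURN value.

-- ===== PORT A =====
-- inner loop of A: walk the row keeping (count_free_place, start); returns the
-- 0-based start index on success (the in-place booking does not affect the result)
def pvRowA : List Int → Int → Int → Int → Int → Option Int
  | [], _, _, _, _ => none
  | x :: rest, idx, count, start, need =>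
    let count' := if x = 0 then count + 1 else 0
    let start' := if x = 0 then (if count = 0 then idx else start) else start
    if count' = need then some start'
    else pvRowA rest (idx + 1) count' start' need

-- outer loop of A over the rows, carrying number_row
def pvRowsA : List (List Int) → Int → Int → Option (Int × Int)
  | [], _, _ => none
  | row :: rest, r, need =>
    match pvRowA row 0 0 0 need with
    | some s => some (r + 1, s + 1)
    | none => pvRowsA rest (r + 1) need

def seatreservation (hall : List (List Int)) (need_seat : Int) : Option (Int × Int) :=
  pvRowsA hall 0 need_seat

-- ===== PORT B =====
-- all(v == 0 for v in row[start:start+need_seat])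
def pvWinB (row : List Int) (s e : Int) : Bool :=
  (PySem.List.slice row (some s) (some e)).all (fun v => v == 0)

-- for start in range(len(row) - need_seat + 1): first start whose window is free
def pvRowB (row : List Int) (need : Int) : Option Int :=
  (PySem.List.pyRange 0 ((row.length : Int) - need + 1) 1).find?
    (fun s => pvWinB row s (s + need))

-- for r, row in enumerate(hall): carried row counter
def pvRowsB : List (List Int) → Int → Int → Option (Int × Int)
  | [], _, _ => none
  | row :: rest, r, need =>
    match pvRowB row need with
    | some s => some (r + 1, s + 1)
    | none => pvRowsB rest (r + 1) need

def seatreservation_alt (hall : List (List Int)) (need_seat : Int) : Option (Int × Int) :=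
  if need_seat < 1 then none else pvRowsB hall 0 need_seat

-- ===== PRECONDITION & SPEC =====
-- On need_seat == 0 with an occupied seat somewhere, A returns a (row, seat) pair
-- pointing at the start of the run before the first occupied seat — an artefact of
-- testing the counter right after its reset — while B returns None, the intended
-- answer for a request of zero seats.
def D_seatreservation (hall : List (List Int)) (need_seat : Int) : Prop :=
  need_seat = 0 ∧ ∃ row ∈ hall, ∃ v ∈ row, v ≠ 0
instance (hall : List (List Int)) (need_seat : Int) : Decidable (D_seatreservation hall need_seat) := by unfold D_seatreservation; infer_instance

def Spec_seatreservation (hall : List (List Int)) (need_seat : Int) (out : Option (Int × Int)) : Prop := ¬ D_seatreservation hall need_seat → out = seatreservation_alt hall need_seat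
instance (hall : List (List Int)) (need_seat : Int) (out : Option (Int × Int)) : Decidable (Spec_seatreservation hall need_seat out) := by unfold Spec_seatreservation; infer_instance

def pvDiffWitness_seatreservation : List (List Int) × Int := ([[1]], 0)
def pvDiffWitnessOut_seatreservation : (Option (Int × Int)) × (Option (Int × Int)) := (some (1, 1), none)

-- ===== CLAIM (what is proved, stated in full; the proofs are below) =====
def Claim_unchanged_seatreservation : Prop := ∀ (hall : List (List Int)) (need_seat : Int), Dom_seatreservation hall need_seat → Spec_seatreservation hall need_seat (seatreservation hall need_seat)
def Claim_changed_seatreservation : Prop := Dom_seatreservation (pvDiffWitness_seatreservation.1) (pvDiffWitness_seatreservation.2) ∧ D_seatreservation (pvDiffWitness_seatreservation.1) (pvDiffWitness_seatreservation.2) ∧ seatreservation (pvDiffWitness_seatreservation.1) (pvDiffWitness_seatreservation.2) = pvDiffWitnessOut_seatreservation.1 ∧ seatreservation_alt (pvDiffWitness_seatreservation.1) (pvDiffWitness_seatreservation.2) = pvDiffWitnessOut_seatreservation.2 ∧ pvDiffWitnessOut_seatreservation.1 ≠ pvDiffWitnessOut_seatreservation.2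
def Claim_exact_seatreservation : Prop := ∀ (hall : List (List Int)) (need_seat : Int), Dom_seatreservation hall need_seat → D_seatreservation hall need_seat → seatreservation hall need_seat ≠ seatreservation_alt hall need_seat

-- ===== LEMMAS AND PROOFS =====

-- find? only looks at elements of the list
theorem pvFind?_congr {α : Type} {p q : α → Bool} : ∀ (l : List α), (∀ x ∈ l, p x = q x) → l.find? p = l.find? q := by
  intro l h
  induction l with
  | nil => rfl
  | cons a t ih =>
    simp only [List.find?_cons]
    rw [h a (by simp)]
    cases q a
    · exact ih (fun x hx => h x (by simp [hx]))
    · rfl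

-- range(1, m) is range(0, m-1) shifted by one
theorem pvRange_shift (m : Int) : PySem.List.pyRange 1 m 1 = (PySem.List.pyRange 0 (m - 1) 1).map (· + 1) := by
  rw [PySem.List.pyRange_one 1 m, PySem.List.pyRange_one 0 (m - 1), List.map_map]
  have h1 : (m - 1 - 0).toNat = (m - 1).toNat := by norm_num
  rw [h1]
  apply List.map_congr_left
  intro k _
  simp; ring

-- B finds nothing in a row shorter than the window
theorem pvRowB_short (row : List Int) (n : Nat) (h : row.length < n) :
    pvRowB row (n : Int) = none := by
  unfold pvRowB
  rw [PySem.List.pyRange_one_eq_nil (by push_cast; omega)]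
  rfl

-- the window at start 0 is the take
theorem pvWinB_zero (row : List Int) (n : Nat) :
    pvWinB row 0 (0 + (n : Int)) = (row.take n).all (fun v => v == 0) := by
  unfold pvWinB
  have h : (0 : Int) + (n : Int) = ((n : Nat) : Int) := by ring
  rw [h, PySem.List.slice_zero_start, PySem.List.slice_to_natCast]

-- shifting a window one seat right past the head
theorem pvWinB_shift (y : Int) (t : List Int) (s : Int) (hs : 0 ≤ s) (n : Nat) :
    pvWinB (y :: t) (s + 1) (s + 1 + (n : Int)) = pvWinB t s (s + (n : Int)) := by
  obtain ⟨k, rfl⟩ := Int.eq_ofNat_of_zero_le hs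
  unfold pvWinB
  have h1 : ((k : Int) + 1) = ((k + 1 : Nat) : Int) := by omega
  rw [h1, PySem.List.slice_natCast_add, PySem.List.slice_natCast_add,
    List.drop_succ_cons]

-- structural unfolding of B's row scan on a row long enough for the window
theorem pvRowB_cons (y : Int) (t : List Int) (n : Nat) (hn : 1 ≤ n) (h : n ≤ t.length + 1) :
    pvRowB (y :: t) (n : Int) =
      if ((y :: t).take n).all (fun v => v == 0) then some 0
      else (pvRowB t (n : Int)).map (· + 1) := by
  unfold pvRowB
  have hm : (0 : Int) < ((y :: t).length : Int) - n + 1 := by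
    simp only [List.length_cons]; push_cast; omega
  rw [PySem.List.pyRange_one_cons hm, List.find?_cons]
  have hz : pvWinB (y :: t) 0 (0 + (n : Int)) = ((y :: t).take n).all (fun v => v == 0) :=
    pvWinB_zero (y :: t) n
  cases hzz : ((y :: t).take n).all (fun v => v == 0) with
  | true =>
    have hw : pvWinB (y :: t) 0 ((0 : Int) + (n : Int)) = true := hz.trans hzz
    simp only [hw, if_true]
  | false =>
    have hw : pvWinB (y :: t) 0 ((0 : Int) + (n : Int)) = false := hz.trans hzz
    simp only [hw, Bool.false_eq_true, if_false]
    rw [show (0 : Int) + 1 = 1 from by ring, pvRange_shift]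
    have harg : ((y :: t).length : Int) - (n : Int) + 1 - 1 = ((t.length : Int) - n + 1) := by
      simp only [List.length_cons]; push_cast; ring
    rw [harg, List.find?_map]
    congr 1
    apply pvFind?_congr
    intro s hs
    have h0s : 0 ≤ s := ((PySem.List.mem_pyRange_one).1 hs).1
    simpa using pvWinB_shift y t s h0s n

-- a row that is zeros-then-occupied: B's search skips past the occupied seat
theorem pvRowB_blocked (x : Int) (hx : x ≠ 0) (n : Nat) (hn : 1 ≤ n) :
    ∀ (c : Nat) (rest : List Int), c < n →
      pvRowB (List.replicate c 0 ++ x :: rest) (n : Int)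
        = (pvRowB rest (n : Int)).map (· + ((c : Int) + 1)) := by
  intro c
  induction c with
  | zero =>
    intro rest _
    simp only [List.replicate_zero, List.nil_append]
    by_cases h : n ≤ rest.length + 1
    · rw [pvRowB_cons x rest n hn h]
      have hfalse : ((x :: rest).take n).all (fun v => v == 0) = false := by
        obtain ⟨n', rfl⟩ : ∃ n', n = n' + 1 := ⟨n - 1, by omega⟩
        simp [List.take_succ_cons, hx]
      simp only [hfalse, Bool.false_eq_true, if_false]
      simp
    · rw [pvRowB_short _ n (by simp; omega), pvRowB_short rest n (by omega)]
      rfl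
  | succ c ih =>
    intro rest hcn
    have hrep : List.replicate (c + 1) (0 : Int) ++ x :: rest
        = 0 :: (List.replicate c 0 ++ x :: rest) := by
      rw [List.replicate_succ]; rfl
    rw [hrep]
    by_cases h : n ≤ (List.replicate c (0 : Int) ++ x :: rest).length + 1
    · rw [pvRowB_cons 0 _ n hn h]
      have hall : ((0 :: (List.replicate c (0 : Int) ++ x :: rest)).take n).all
          (fun v => v == 0) = false := by
        rw [← hrep]
        have hxm : x ∈ (List.replicate (c + 1) (0 : Int) ++ x :: rest).take n := by
          rw [List.take_append]
          have : (x :: rest).take (n - (List.replicate (c + 1) (0 : Int)).length) =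
              x :: rest.take (n - (c + 1) - 1) := by
            simp only [List.length_replicate]
            obtain ⟨d, hd⟩ : ∃ d, n - (c + 1) = d + 1 := ⟨n - (c + 1) - 1, by omega⟩
            rw [hd, List.take_succ_cons]
            congr 1
          rw [this]
          exact List.mem_append_right _ (by simp)
        apply List.all_eq_false.2
        exact ⟨x, hxm, by simpa using hx⟩
      simp only [hall, Bool.false_eq_true, if_false]
      rw [ih rest (by omega), Option.map_map]
      congr 1
      funext s
      simp only [Function.comp_apply]
      push_cast; ring
    · rw [pvRowB_short _ n (by
          simp only [List.length_cons, List.length_append, List.length_replicate,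
            not_le] at h ⊢
          omega),
          pvRowB_short rest n (by
          simp only [List.length_append, List.length_replicate, List.length_cons,
            not_le] at h
          omega)]
      rfl

-- A's counter scan computes B's window scan over the row prefixed by the
-- virtual run of `c` free seats it has already counted
theorem pvRowA_eq (n : Nat) (hn : 1 ≤ n) :
    ∀ (rest : List Int) (c : Nat) (idx start : Int), c < n → (c = 0 ∨ start = idx - c) →
      pvRowA rest idx (c : Int) start (n : Int)
        = (pvRowB (List.replicate c 0 ++ rest) (n : Int)).map (fun s => idx - (c : Int) + s) := by
  intro rest
  induction rest with
  | nil =>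
    intro c idx start hcn _
    rw [pvRowB_short _ n (by simp; omega)]
    rfl
  | cons x t ih =>
    intro c idx start hcn hstart
    have hstart' :
        (if (c : Int) = 0 then idx else start) = idx - (c : Int) := by
      rcases Nat.eq_zero_or_pos c with h0 | hpos
      · subst h0; simp
      · have hcne : ¬((c : Int) = 0) := by
          have : c ≠ 0 := by omega
          exact_mod_cast this
        rw [if_neg hcne]
        rcases hstart with h0 | hs
        · omega
        · rw [hs]
    by_cases hx : x = 0
    · subst hx
      have hrep : List.replicate c (0 : Int) ++ 0 :: t
          = List.replicate (c + 1) 0 ++ t := by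
        rw [List.replicate_succ']; simp
      simp only [pvRowA, if_true]
      rw [hstart']
      split_ifs with hcond
      · -- the run is completed here
        have hc : c + 1 = n := by exact_mod_cast hcond
        have hsome : pvRowB (List.replicate n (0 : Int) ++ t) (n : Int) = some 0 := by
          obtain ⟨n', rfl⟩ : ∃ n', n = n' + 1 := ⟨n - 1, by omega⟩
          rw [List.replicate_succ, List.cons_append]
          rw [pvRowB_cons _ _ _ hn (by
            simp only [List.length_append, List.length_replicate]; omega)]
          have hall : (((0 : Int) :: (List.replicate n' 0 ++ t)).take (n' + 1)).all
              (fun v => v == 0) = true := by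
            rw [← List.cons_append, ← List.replicate_succ, List.take_append]
            simp
          simp only [hall, if_pos]
        rw [hrep, hc, hsome]
        simp
      · have hc : c + 1 ≠ n := fun hh => hcond (by exact_mod_cast hh)
        have ihs := ih (c + 1) (idx + 1) (idx - (c : Int)) (by omega)
          (Or.inr (by push_cast; ring))
        push_cast at ihs ⊢
        rw [ihs, hrep]
        congr 1
        funext s
        ring
    · simp only [pvRowA, if_neg hx]
      rw [if_neg (by
        have : (0 : Int) < (n : Int) := by exact_mod_cast hn
        omega)]
      have hih := ih 0 (idx + 1) start (by omega) (Or.inl rfl)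
      simp only [Nat.cast_zero, List.replicate_zero, List.nil_append] at hih
      rw [hih, pvRowB_blocked x hx n hn c t hcn, Option.map_map]
      congr 1
      funext s
      simp only [Function.comp_apply]
      ring

-- the two outer row loops agree for a positive request
theorem pvRows_eq (n : Nat) (hn : 1 ≤ n) :
    ∀ (hall : List (List Int)) (r : Int), pvRowsA hall r (n : Int) = pvRowsB hall r (n : Int) := by
  intro hall
  induction hall with
  | nil => intro r; rfl
  | cons row rest ih =>
    intro r
    have hrow : pvRowA row 0 0 0 (n : Int) = pvRowB row (n : Int) := by
      have := pvRowA_eq n hn row 0 0 0 (by omega) (Or.inl rfl)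
      simp only [Nat.cast_zero, List.replicate_zero, List.nil_append] at this
      rw [this]
      have : (fun s => (0 : Int) - 0 + s) = fun s : Int => s := by funext s; ring
      rw [this, Option.map_id']
    simp only [pvRowsA, pvRowsB, hrow]
    cases pvRowB row (n : Int) with
    | some s => rfl
    | none => exact ih (r + 1)

-- a negative request never matches A's (nonnegative) counter
theorem pvRowA_neg (need : Int) (hneed : need < 0) :
    ∀ (l : List Int) (idx c : Int), 0 ≤ c → ∀ start, pvRowA l idx c start need = none := by
  intro l
  induction l with
  | nil => intro idx c _ start; rfl
  | cons x t ih =>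
    intro idx c hc start
    simp only [pvRowA]
    by_cases hx : x = 0
    · rw [if_pos hx, if_neg (by omega)]
      exact ih _ _ (by omega) _
    · rw [if_neg hx, if_neg (by omega)]
      exact ih _ _ (by omega) _

-- need_seat == 0 on an all-free row: the counter never returns to 0
theorem pvRowA_zero_none :
    ∀ (l : List Int), (∀ v ∈ l, v = 0) → ∀ (idx c : Int), 0 ≤ c → ∀ start,
      pvRowA l idx c start 0 = none := by
  intro l
  induction l with
  | nil => intro _ idx c _ start; rfl
  | cons x t ih =>
    intro hall idx c hc start
    have hx : x = 0 := hall x (by simp)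
    simp only [pvRowA, if_pos hx]
    rw [if_neg (by omega)]
    exact ih (fun v hv => hall v (by simp [hv])) _ _ (by omega) _

-- need_seat == 0 on a row with an occupied seat: A returns at the reset
theorem pvRowA_zero_some :
    ∀ (l : List Int), (∃ v ∈ l, v ≠ 0) → ∀ (idx c : Int), 0 ≤ c → ∀ start,
      (pvRowA l idx c start 0).isSome := by
  intro l
  induction l with
  | nil => intro h; simp at h
  | cons x t ih =>
    intro hex idx c hc start
    simp only [pvRowA]
    by_cases hx : x = 0
    · rw [if_pos hx, if_neg (by omega)]
      have hext : ∃ v ∈ t, v ≠ 0 := by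
        rcases hex with ⟨v, hv, hvne⟩
        rcases List.mem_cons.1 hv with rfl | hvt
        · exact absurd hx hvne
        · exact ⟨v, hvt, hvne⟩
      exact ih hext _ _ (by omega) _
    · rw [if_neg hx, if_pos rfl]
      rfl

-- outer loop versions of the three degenerate facts
theorem pvRowsA_neg (need : Int) (hneed : need < 0) :
    ∀ (hall : List (List Int)) (r : Int), pvRowsA hall r need = none := by
  intro hall
  induction hall with
  | nil => intro r; rfl
  | cons row rest ih =>
    intro r
    simp only [pvRowsA, pvRowA_neg need hneed row 0 0 (by omega) 0]
    exact ih (r + 1)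

theorem pvRowsA_zero_none :
    ∀ (hall : List (List Int)), (∀ row ∈ hall, ∀ v ∈ row, v = 0) → ∀ r,
      pvRowsA hall r 0 = none := by
  intro hall
  induction hall with
  | nil => intro _ r; rfl
  | cons row rest ih =>
    intro hall0 r
    simp only [pvRowsA,
      pvRowA_zero_none row (fun v hv => hall0 row (by simp) v hv) 0 0 (by omega) 0]
    exact ih (fun rw hrw v hv => hall0 rw (by simp [hrw]) v hv) (r + 1)

theorem pvRowsA_zero_some :
    ∀ (hall : List (List Int)), (∃ row ∈ hall, ∃ v ∈ row, v ≠ 0) → ∀ r,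
      (pvRowsA hall r 0).isSome := by
  intro hall
  induction hall with
  | nil => intro h; simp at h
  | cons row rest ih =>
    intro hex r
    simp only [pvRowsA]
    by_cases hrow : ∃ v ∈ row, v ≠ 0
    · have := pvRowA_zero_some row hrow 0 0 (by omega) 0
      cases hs : pvRowA row 0 0 0 0 with
      | some s => rfl
      | none => rw [hs] at this; simp at this
    · have hrow0 : ∀ v ∈ row, v = 0 := by
        intro v hv
        by_contra hne
        exact hrow ⟨v, hv, hne⟩
      rw [pvRowA_zero_none row hrow0 0 0 (by omega) 0]
      have hext : ∃ rw ∈ rest, ∃ v ∈ rw, v ≠ 0 := by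
        rcases hex with ⟨rw, hrw, v, hv, hvne⟩
        rcases List.mem_cons.1 hrw with rfl | hrest
        · exact absurd (hrow0 v hv) hvne
        · exact ⟨rw, hrest, v, hv, hvne⟩
      exact ih hext (r + 1)

-- ===== VERDICT (by name: the statement is the Claim_ definition above) =====
theorem seatreservation_spec : Claim_unchanged_seatreservation := by
  intro hall need _ hnD'
  by_cases h1 : need < 1
  · unfold seatreservation seatreservation_alt
    rw [if_pos h1]
    rcases lt_or_ge need 0 with hneg | h0
    · exact pvRowsA_neg need hneg hall 0
    · have h00 : need = 0 := by omega
      subst h00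
      have hall0 : ∀ row ∈ hall, ∀ v ∈ row, v = 0 := by
        intro row hrow v hv
        by_contra hne
        exact hnD' (by unfold D_seatreservation; exact ⟨rfl, row, hrow, v, hv, hne⟩)
      exact pvRowsA_zero_none hall hall0 0
  · unfold seatreservation seatreservation_alt
    rw [if_neg h1]
    obtain ⟨n, rfl⟩ := Int.eq_ofNat_of_zero_le (by omega : (0 : Int) ≤ need)
    exact pvRows_eq n (by exact_mod_cast (by omega : (1 : Int) ≤ (n : Int))) hall 0
theorem seatreservation_changed : Claim_changed_seatreservation := by
  unfold Claim_changed_seatreservation; decide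
theorem seatreservation_tight : Claim_exact_seatreservation := by
  intro hall need _ hD
  unfold D_seatreservation at hD
  rcases hD with ⟨hneed, hex⟩
  subst hneed
  unfold seatreservation seatreservation_alt
  rw [if_pos (by omega)]
  intro h
  have := pvRowsA_zero_some hall hex 0
  rw [h] at this
  simp at this
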